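-- pv_equiv track=rewrite | github.com/AgentToolkit/agent-mentor | backend/src/agent_analytics/extensions/spans_processing/task_span_processing/span_utils.py | add_fields_acc_to_startswith
-- ===== SOURCE A (Python) =====
-- from typing import Any
--
-- def add_fields_acc_to_startswith(names_list: list[str], span_dict: dict[str, Any],
--                                  attr_dict: dict[str, Any]) -> dict[str, Any]:
--     """
--     Add fields from span dictionary to attribute dictionary based on prefix.
--
--     Args:
--         names_list: List of prefixes to match
--         span_dict: Dictionary of span attributes
--         attr_dict: Dictionary to add attributes to
--
--     Returns:
--         Updated attribute dictionary
--     """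
--     span_keys = list(span_dict.keys())
--
--     for name in names_list:
--         # Find keys that start with the specified prefix
--         keys_to_add = [key for key in span_keys if key.startswith(name)]
--
--         # Create a dictionary of matching key-value pairs
--         attr_to_add = {key: span_dict[key] for key in keys_to_add}
--
--         # Update the attribute dictionary
--         attr_dict.update(attr_to_add)
--
--     return attr_dict
-- ===== SOURCE B (Python) =====
-- def add_fields_acc_to_startswith(names_list, span_dict, attr_dict):
--     # key-major pass: each span key is routed to the bucket of its FIRST matching
--     # prefix (and tested no further); buckets are then flushed in prefix order.
--     buckets = [[] for _ in names_list]
--     for key in span_dict: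
--         for i, name in enumerate(names_list):
--             if key.startswith(name):
--                 buckets[i].append(key)
--                 break
--     for bucket in buckets:
--         for key in bucket:
--             attr_dict[key] = span_dict[key]
--     return attr_dict
-- ===== Notes on version B (the rewrite author's own statement) =====
-- stated objective: alternative
-- what changed: Replaces A's prefix-major rescan (for every prefix: scan all span keys, build an intermediate dict, dict.update) with a key-major single routing pass: each span key is tested against prefixes only up to its first match and dropped into that prefix's bucket, then the buckets are flushed into attr_dict in prefix order, each key inserted at most once (intended as faster; measured ~1.7x on mid-size inputs, unconfirmed at the largest size).
import Mathlib
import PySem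

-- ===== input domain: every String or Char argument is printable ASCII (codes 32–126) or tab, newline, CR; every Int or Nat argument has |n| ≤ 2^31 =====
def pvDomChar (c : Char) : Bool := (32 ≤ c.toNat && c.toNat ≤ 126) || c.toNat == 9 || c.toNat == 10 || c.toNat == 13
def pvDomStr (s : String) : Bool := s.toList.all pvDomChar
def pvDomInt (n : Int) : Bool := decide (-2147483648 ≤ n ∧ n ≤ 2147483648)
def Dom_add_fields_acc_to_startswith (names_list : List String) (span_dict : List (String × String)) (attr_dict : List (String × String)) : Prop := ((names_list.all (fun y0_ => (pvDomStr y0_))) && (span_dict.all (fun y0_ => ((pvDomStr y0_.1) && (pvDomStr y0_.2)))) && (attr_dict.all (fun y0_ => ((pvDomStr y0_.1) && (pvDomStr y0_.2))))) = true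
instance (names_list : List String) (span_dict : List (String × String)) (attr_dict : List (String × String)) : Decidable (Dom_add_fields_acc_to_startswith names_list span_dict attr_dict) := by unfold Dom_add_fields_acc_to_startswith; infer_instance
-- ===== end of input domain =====

-- B routes each span key once to the bucket of its first matching prefix (key-major,
-- first-match short-circuit) instead of rescanning all keys and rebuilding a dict per
-- prefix; equal return value — both Pythons mutate attr_dict in place to that same value.

-- ===== PORT A =====
def add_fields_acc_to_startswith (names_list : List String) (span_dict : List (String × String)) (attr_dict : List (String × String)) : List (String × String) :=
  let span : PySem.Dict String String := PySem.Dict.mk span_dict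
  let span_keys := span.keys
  (names_list.foldl (fun attr name =>
      let keys_to_add := span_keys.filter (fun key => PySem.Str.startswith key name)
      -- span_dict[key]: key ∈ span_keys, so get? is some and getD with "" is exact here
      let attr_to_add := keys_to_add.foldl (fun d key => d.insert key (span.getD key "")) PySem.Dict.empty
      attr.update attr_to_add.items)
    (PySem.Dict.mk attr_dict)).items

-- ===== PORT B =====
-- inner `for i, name in enumerate(names_list): if key.startswith(name): buckets[i].append(key); break`,
-- walking names and buckets in step (buckets always has exactly one bucket per name)
def pvPlace (key : String) : List String → List (List String) → List (List String)
  | _, [] => []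
  | [], bs => bs
  | name :: names, b :: bs =>
      if PySem.Str.startswith key name then (b ++ [key]) :: bs
      else b :: pvPlace key names bs

def add_fields_acc_to_startswith_alt (names_list : List String) (span_dict : List (String × String)) (attr_dict : List (String × String)) : List (String × String) :=
  let span : PySem.Dict String String := PySem.Dict.mk span_dict
  let buckets := span.keys.foldl (fun bs key => pvPlace key names_list bs) (names_list.map fun _ => [])
  (buckets.foldl (fun attr b => b.foldl (fun a key => a.insert key (span.getD key "")) attr) (PySem.Dict.mk attr_dict)).items

-- ===== PRECONDITION & SPEC =====
-- The two list arguments encode Python dicts; Pre_ only requires the encodings to be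
-- well-formed (distinct keys) — every input the Python function can receive satisfies it.
def Pre_add_fields_acc_to_startswith (names_list : List String) (span_dict : List (String × String)) (attr_dict : List (String × String)) : Prop :=
  (span_dict.map (·.1)).Nodup ∧ (attr_dict.map (·.1)).Nodup
instance (names_list : List String) (span_dict : List (String × String)) (attr_dict : List (String × String)) : Decidable (Pre_add_fields_acc_to_startswith names_list span_dict attr_dict) := by unfold Pre_add_fields_acc_to_startswith; infer_instance

def pvWitness_add_fields_acc_to_startswith : List String × (List (String × String)) × (List (String × String)) :=
  (["a"], [("ab", "1"), ("x", "2")], [("c", "0")])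

def Spec_add_fields_acc_to_startswith (names_list : List String) (span_dict : List (String × String)) (attr_dict : List (String × String)) (out : List (String × String)) : Prop := out = add_fields_acc_to_startswith_alt names_list span_dict attr_dict
instance (names_list : List String) (span_dict : List (String × String)) (attr_dict : List (String × String)) (out : List (String × String)) : Decidable (Spec_add_fields_acc_to_startswith names_list span_dict attr_dict out) := by unfold Spec_add_fields_acc_to_startswith; infer_instance

-- ===== CLAIM (what is proved, stated in full; the proofs are below) =====
def Claim_equal_add_fields_acc_to_startswith : Prop := ∀ (names_list : List String) (span_dict : List (String × String)) (attr_dict : List (String × String)), Dom_add_fields_acc_to_startswith names_list span_dict attr_dict → Pre_add_fields_acc_to_startswith names_list span_dict attr_dict → Spec_add_fields_acc_to_startswith names_list span_dict attr_dict (add_fields_acc_to_startswith names_list span_dict attr_dict)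

-- ===== LEMMAS AND PROOFS =====

-- the insertion step both programs share: attr[k] = val k
def pvIns (val : String → String) (a : PySem.Dict String String) (k : String) : PySem.Dict String String :=
  a.insert k (val k)

-- per-prefix buckets, described directly: bucket of the first name holds the keys
-- matching it, the remaining buckets bucket the remaining keys
def pvSpec : List String → List String → List (List String)
  | [], _ => []
  | n :: ns, keys =>
      keys.filter (fun k => PySem.Str.startswith k n)
        :: pvSpec ns (keys.filter (fun k => !PySem.Str.startswith k n))

theorem pvInsert_self_of_get? (d : PySem.Dict String String) (k : String) (v : String)
    (hn : d.keys.Nodup) (h : d.get? k = some v) : d.insert k v = d := by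
  apply PySem.Dict.ext
  have hc : d.contains k = true := by
    rw [PySem.Dict.contains_eq_isSome_get?, h]; rfl
  rw [PySem.Dict.items_insert_of_contains _ _ hc]
  have hall : ∀ p ∈ d.items, (if p.1 == k then (k, v) else p) = p := by
    intro p hp
    by_cases hpk : p.1 = k
    · have h2 : d.get? p.1 = some p.2 :=
        PySem.Dict.get?_of_mem_items d (show (p.1, p.2) ∈ d.items by simpa using hp) hn
      rw [hpk] at h2; rw [h2] at h
      have hv : p.2 = v := by injection h
      subst hv; subst hpk; simp
    · simp [hpk]
  rw [List.map_congr_left hall]; simp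

theorem pvPres (val : String → String) (l : List String) : ∀ (a : PySem.Dict String String)
    (k : String), a.get? k = some (val k) →
    (l.foldl (pvIns val) a).get? k = some (val k) := by
  induction l with
  | nil => intro a k h; simpa using h
  | cons x l ih =>
    intro a k h
    simp only [List.foldl_cons]
    apply ih
    by_cases hxk : k = x
    · subst hxk; simp [pvIns, PySem.Dict.get?_insert_self]
    · rw [pvIns, PySem.Dict.get?_insert_of_ne _ _ hxk]; exact h

theorem pvMem (val : String → String) (l : List String) : ∀ (a : PySem.Dict String String)
    (k : String), k ∈ l →
    (l.foldl (pvIns val) a).get? k = some (val k) := by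
  induction l with
  | nil => intro a k h; simp at h
  | cons x l ih =>
    intro a k h
    simp only [List.foldl_cons]
    by_cases hxk : k = x
    · subst hxk
      exact pvPres val l _ k (by simp [pvIns, PySem.Dict.get?_insert_self])
    · exact ih _ k (by rcases List.mem_cons.1 h with h | h; exact absurd h hxk; exact h)

theorem pvNodupFoldl (val : String → String) (l : List String) (a : PySem.Dict String String)
    (h : a.keys.Nodup) : (l.foldl (pvIns val) a).keys.Nodup :=
  PySem.Dict.nodup_keys_foldl_insert l (fun _ k => val k) a h

theorem pvSkip (val : String → String) (p : String → Bool) (l : List String) :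
    ∀ (a : PySem.Dict String String), a.keys.Nodup →
    (∀ k ∈ l, p k = false → a.get? k = some (val k)) →
    l.foldl (pvIns val) a = (l.filter p).foldl (pvIns val) a := by
  induction l with
  | nil => intro a _ _; rfl
  | cons x l ih =>
    intro a hn hinv
    by_cases hp : p x = true
    · rw [List.filter_cons_of_pos hp]
      simp only [List.foldl_cons]
      apply ih
      · exact PySem.Dict.nodup_keys_insert _ _ _ hn
      · intro k hk hpk
        have hne : k ≠ x := fun he => by rw [he] at hpk; rw [hpk] at hp; cases hp
        rw [pvIns, PySem.Dict.get?_insert_of_ne _ _ hne]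
        exact hinv k (List.mem_cons_of_mem _ hk) hpk
    · have hpf : p x = false := by simpa using hp
      rw [List.filter_cons_of_neg (by simp [hpf])]
      simp only [List.foldl_cons]
      have := hinv x (List.mem_cons_self) hpf
      rw [show pvIns val a x = a from pvInsert_self_of_get? a x (val x) hn this]
      exact ih a hn (fun k hk hpk => hinv k (List.mem_cons_of_mem _ hk) hpk)

-- A's per-name step (build a dict of the matching pairs, then dict.update) is the
-- plain insertion fold over the matching keys
theorem pvAStep (val : String → String) (l : List String) (hl : l.Nodup)
    (a : PySem.Dict String String) :
    a.update ((l.foldl (fun d k => d.insert k (val k)) PySem.Dict.empty).items)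
      = l.foldl (pvIns val) a := by
  have h := PySem.Dict.items_foldl_insert_fresh (k := fun x => x) (v := val) (l := l)
      (d := (PySem.Dict.empty : PySem.Dict String String))
      (by intro x _; exact PySem.Dict.contains_empty x) (by simpa using hl)
  beta_reduce at h
  rw [h]
  show ((PySem.Dict.empty (κ := String) (ν := String)).items ++ l.map fun x => (x, val x)).foldl
      (fun d p => d.insert p.1 p.2) a = _
  simp [List.foldl_map, show (PySem.Dict.empty : PySem.Dict String String).items = [] from rfl]
  rfl

theorem pvSpec_nil (ns : List String) : pvSpec ns [] = ns.map (fun _ => []) := by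
  induction ns with
  | nil => rfl
  | cons n ns ih => simp [pvSpec, ih]

theorem pvSpec_length (ns : List String) : ∀ (keys : List String),
    (pvSpec ns keys).length = ns.length := by
  induction ns with
  | nil => intro keys; rfl
  | cons n ns ih => intro keys; simp [pvSpec, ih]

theorem pvPlace_length (k : String) (ns : List String) : ∀ (bs : List (List String)),
    (pvPlace k ns bs).length = bs.length := by
  induction ns with
  | nil => intro bs; cases bs <;> rfl
  | cons n ns ih =>
    intro bs
    cases bs with
    | nil => rfl
    | cons b bs =>
      by_cases h : PySem.Chars.startswith k.toList n.toList = true <;> simp [pvPlace, h, ih]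

theorem pvZipNil (B0 : List (List String)) : ∀ (ns : List String), B0.length = ns.length →
    List.zipWith (· ++ ·) B0 (ns.map fun _ => ([] : List String)) = B0 := by
  induction B0 with
  | nil => intro ns h; simp
  | cons b bs ih =>
    intro ns h
    cases ns with
    | nil => simp at h
    | cons n ns => simpa using ih ns (by simpa using h)

theorem pvZipNil' (ns : List String) : ∀ (l : List (List String)), l.length = ns.length →
    List.zipWith (· ++ ·) (ns.map fun _ => ([] : List String)) l = l := by
  induction ns with
  | nil => intro l h; simp [List.length_eq_zero_iff.1 h]
  | cons n ns ih =>
    intro l h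
    cases l with
    | nil => simp at h
    | cons b bs => simpa using ih bs (by simpa using h)

theorem pvPlaceSpec (k : String) (ns : List String) :
    ∀ (B0 : List (List String)) (keys : List String), B0.length = ns.length →
    List.zipWith (· ++ ·) (pvPlace k ns B0) (pvSpec ns keys)
      = List.zipWith (· ++ ·) B0 (pvSpec ns (k :: keys)) := by
  induction ns with
  | nil =>
    intro B0 keys h
    have : B0 = [] := List.length_eq_zero_iff.1 h
    subst this; rfl
  | cons n ns ih =>
    intro B0 keys h
    cases B0 with
    | nil => simp at h
    | cons b bs =>
      by_cases hs : PySem.Chars.startswith k.toList n.toList = true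
      · simp [pvPlace, pvSpec, hs]
      · simp only [pvPlace, pvSpec, List.filter_cons, List.zipWith_cons_cons]
        rw [if_neg (by simp [hs]), if_neg (by simp [hs]), if_pos (by simp [hs])]
        exact List.cons_eq_cons.2 ⟨rfl, ih bs (keys.filter (fun k => !PySem.Str.startswith k n)) (by simpa using h)⟩

theorem pvBuckets (ns : List String) (keys : List String) :
    ∀ (B0 : List (List String)), B0.length = ns.length →
    keys.foldl (fun bs k => pvPlace k ns bs) B0 = List.zipWith (· ++ ·) B0 (pvSpec ns keys) := by
  induction keys with
  | nil => intro B0 h; rw [pvSpec_nil]; exact (pvZipNil B0 ns h).symm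
  | cons k keys ih =>
    intro B0 h
    simp only [List.foldl_cons]
    rw [ih (pvPlace k ns B0) (by rw [pvPlace_length]; exact h)]
    exact pvPlaceSpec k ns B0 keys h

theorem pvMain (val : String → String) (keys : List String) (hk : keys.Nodup)
    (names : List String) :
    ∀ (q : String → Bool) (attr : PySem.Dict String String), attr.keys.Nodup →
    (∀ k ∈ keys, q k = false → attr.get? k = some (val k)) →
    names.foldl (fun a n =>
        a.update (((keys.filter (fun k => PySem.Str.startswith k n)).foldl
          (fun d k => d.insert k (val k)) PySem.Dict.empty).items)) attr
      = (pvSpec names (keys.filter q)).foldl (fun a b => b.foldl (pvIns val) a) attr := by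
  induction names with
  | nil => intro q attr _ _; rfl
  | cons n ns ih =>
    intro q attr hn hinv
    simp only [List.foldl_cons, pvSpec]
    rw [pvAStep val _ (hk.filter _) attr]
    have hcomm : (keys.filter q).filter (fun k => PySem.Str.startswith k n)
        = (keys.filter (fun k => PySem.Str.startswith k n)).filter q :=
      List.filter_comm _ _ _
    have hstep : (keys.filter (fun k => PySem.Str.startswith k n)).foldl (pvIns val) attr
        = ((keys.filter q).filter (fun k => PySem.Str.startswith k n)).foldl (pvIns val) attr := by
      rw [hcomm]
      exact pvSkip val q _ attr hn (fun k hkm hq => hinv k (List.mem_filter.1 hkm).1 hq)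
    rw [hstep]
    have hq' : (keys.filter q).filter (fun k => !PySem.Str.startswith k n)
        = keys.filter (fun k => q k && !PySem.Str.startswith k n) := by
      rw [List.filter_filter]
      exact List.filter_congr (fun k _ => Bool.and_comm _ _)
    rw [hq']
    refine ih (fun k => q k && !PySem.Str.startswith k n) _ (pvNodupFoldl val _ attr hn) ?_
    intro k hkm hq
    cases hqk : q k with
    | false => exact pvPres val _ _ k (hinv k hkm hqk)
    | true =>
      have hsw : PySem.Str.startswith k n = true := by
        simp only [] at hq; rw [hqk] at hq; simpa using hq
      exact pvMem val _ _ k (List.mem_filter.2 ⟨List.mem_filter.2 ⟨hkm, hqk⟩, hsw⟩)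

-- ===== VERDICT (by name: the statement is the Claim_ definition above) =====
theorem add_fields_acc_to_startswith_spec : Claim_equal_add_fields_acc_to_startswith := by
  intro names_list span_dict attr_dict _ hpre
  simp only [Spec_add_fields_acc_to_startswith, add_fields_acc_to_startswith,
    add_fields_acc_to_startswith_alt]
  have hkeys : (PySem.Dict.mk span_dict : PySem.Dict String String).keys.Nodup := by
    rw [PySem.Dict.keys_mk]; exact hpre.1
  have hattr : (PySem.Dict.mk attr_dict : PySem.Dict String String).keys.Nodup := by
    rw [PySem.Dict.keys_mk]; exact hpre.2
  rw [pvBuckets names_list (PySem.Dict.mk span_dict : PySem.Dict String String).keys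
      (names_list.map fun _ => []) (by simp)]
  rw [pvZipNil' names_list _ (pvSpec_length names_list _)]
  have hmain := pvMain (fun k => (PySem.Dict.mk span_dict : PySem.Dict String String).getD k "")
      (PySem.Dict.mk span_dict : PySem.Dict String String).keys hkeys names_list (fun _ => true)
      (PySem.Dict.mk attr_dict) hattr (by intro k _ h; cases h)
  rw [List.filter_true] at hmain
  rw [hmain]
  rfl
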